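-- pv_equiv track=rewrite | github.com/Vladimir7193/pybot | smc_setup_patterns.py | _find_recent_sweep
-- ===== SOURCE A (Python) =====
-- from typing import List, Optional
--
-- def _find_recent_sweep(
--
--     idx: int,
--     sweeps: List,
--     lookback: int = 5,
-- ) -> Optional[dict]:
--     """Find most recent liquidity sweep."""
--     for sweep in reversed(sweeps):
--         sweep_idx = sweep.get("index", -1)
--         if idx - lookback <= sweep_idx <= idx:
--             return sweep
--     return None
-- ===== SOURCE B (Python) =====
-- from typing import List, Optional
--
-- def _find_recent_sweep(
--     idx: int,
--     sweeps: List,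
--     lookback: int = 5,
-- ) -> Optional[dict]:
--     """Find most recent liquidity sweep (forward scan, keep last match)."""
--     result = None
--     for sweep in sweeps:
--         sweep_idx = sweep.get("index", -1)
--         if idx - lookback <= sweep_idx <= idx:
--             result = sweep
--     return result
-- ===== Notes on version B (the rewrite author's own statement) =====
-- stated objective: alternative
-- what changed: Replaces the reversed-iteration with early return by a single forward pass that keeps overwriting an accumulator with the latest in-window sweep and returns it after the loop (no reversal, no early exit).
import Mathlib
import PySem

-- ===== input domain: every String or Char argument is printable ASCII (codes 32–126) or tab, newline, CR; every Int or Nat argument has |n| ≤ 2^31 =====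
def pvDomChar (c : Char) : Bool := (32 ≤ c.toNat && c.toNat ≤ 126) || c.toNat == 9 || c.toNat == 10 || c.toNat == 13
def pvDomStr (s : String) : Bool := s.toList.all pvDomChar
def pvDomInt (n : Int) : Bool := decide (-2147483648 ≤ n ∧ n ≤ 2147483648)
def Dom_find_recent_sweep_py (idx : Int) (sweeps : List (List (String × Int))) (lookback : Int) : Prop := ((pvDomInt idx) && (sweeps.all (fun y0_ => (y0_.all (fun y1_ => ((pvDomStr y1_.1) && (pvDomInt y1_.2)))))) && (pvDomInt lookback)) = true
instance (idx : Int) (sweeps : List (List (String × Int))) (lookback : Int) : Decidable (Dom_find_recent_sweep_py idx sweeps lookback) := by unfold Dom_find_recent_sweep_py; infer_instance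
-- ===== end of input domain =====

-- B differs from A only in decomposition: a forward overwrite-accumulator pass instead of A's reversed scan with early return; return values are identical.

-- sweep.get("index", -1) — shared by both Pythons
def pvSweepIdx (s : List (String × Int)) : Int := (PySem.Dict.mk s).getD "index" (-1)

-- ===== PORT A =====
-- the 'for sweep in reversed(sweeps): … return sweep' loop
def pvAgo (idx lookback : Int) : List (List (String × Int)) → Option (List (String × Int))
  | [] => none
  | s :: rest =>
      let sweep_idx := pvSweepIdx s
      if idx - lookback ≤ sweep_idx ∧ sweep_idx ≤ idx then some s
      else pvAgo idx lookback rest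

def find_recent_sweep_py (idx : Int) (sweeps : List (List (String × Int))) (lookback : Int) : Option (List (String × Int)) :=
  pvAgo idx lookback sweeps.reverse

-- ===== PORT B =====
def find_recent_sweep_py_alt (idx : Int) (sweeps : List (List (String × Int))) (lookback : Int) : Option (List (String × Int)) :=
  sweeps.foldl
    (fun result sweep =>
      let sweep_idx := pvSweepIdx sweep
      if idx - lookback ≤ sweep_idx ∧ sweep_idx ≤ idx then some sweep else result)
    none

-- ===== PRECONDITION & SPEC =====
def Spec_find_recent_sweep_py (idx : Int) (sweeps : List (List (String × Int))) (lookback : Int) (out : Option (List (String × Int))) : Prop := out = find_recent_sweep_py_alt idx sweeps lookback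
instance (idx : Int) (sweeps : List (List (String × Int))) (lookback : Int) (out : Option (List (String × Int))) : Decidable (Spec_find_recent_sweep_py idx sweeps lookback out) := by unfold Spec_find_recent_sweep_py; infer_instance

-- ===== CLAIM (what is proved, stated in full; the proofs are below) =====
def Claim_equal_find_recent_sweep_py : Prop := ∀ (idx : Int) (sweeps : List (List (String × Int))) (lookback : Int), Dom_find_recent_sweep_py idx sweeps lookback → Spec_find_recent_sweep_py idx sweeps lookback (find_recent_sweep_py idx sweeps lookback)

-- ===== LEMMAS AND PROOFS =====

theorem pvAgo_append (idx lookback : Int) (a b : List (List (String × Int))) :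
    pvAgo idx lookback (a ++ b) = (pvAgo idx lookback a).or (pvAgo idx lookback b) := by
  induction a with
  | nil => simp [pvAgo]
  | cons s rest ih =>
      simp only [List.cons_append, pvAgo]
      split
      · rfl
      · exact ih

theorem pvFoldl_eq (idx lookback : Int) (l : List (List (String × Int)))
    (res : Option (List (String × Int))) :
    l.foldl
      (fun result sweep =>
        let sweep_idx := pvSweepIdx sweep
        if idx - lookback ≤ sweep_idx ∧ sweep_idx ≤ idx then some sweep else result)
      res
      = match pvAgo idx lookback l.reverse with
        | some s => some s
        | none => res := by
  induction l generalizing res with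
  | nil => simp [pvAgo]
  | cons x l ih =>
      simp only [List.foldl_cons, List.reverse_cons, pvAgo_append]
      rw [ih]
      cases h : pvAgo idx lookback l.reverse with
      | some s => simp [Option.or]
      | none =>
          simp only [Option.or]
          simp [pvAgo]
          split <;> rfl

-- ===== VERDICT (by name: the statement is the Claim_ definition above) =====
theorem find_recent_sweep_py_spec : Claim_equal_find_recent_sweep_py := by
  intro idx sweeps lookback _
  unfold Spec_find_recent_sweep_py find_recent_sweep_py find_recent_sweep_py_alt
  rw [pvFoldl_eq]
  cases h : pvAgo idx lookback sweeps.reverse <;> simp
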